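-- pv_equiv track=rewrite | github.com/xlwh/ChonoDB | test_scripts/large_scale_test.py | generate_series_labels
-- ===== SOURCE A (Python) =====
-- def generate_series_labels(metric_index, series_index):
--     """生成序列标签"""
--     jobs = ["frontend", "backend", "api", "worker", "scheduler"]
--     instances = [f"instance-{i:03d}" for i in range(20)]
--     regions = ["us-east-1", "us-west-2", "eu-west-1", "ap-southeast-1"]
--     environments = ["production", "staging", "development"]
--
--     job = jobs[series_index % len(jobs)]
--     instance = instances[(series_index // len(jobs)) % len(instances)]
--     region = regions[(series_index // (len(jobs) * len(instances))) % len(regions)]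
--     environment = environments[(series_index // (len(jobs) * len(instances) * len(regions))) % len(environments)]
--
--     return f'job="{job}", instance="{instance}", region="{region}", environment="{environment}"'
-- ===== SOURCE B (Python) =====
-- def generate_series_labels(metric_index, series_index):
--     """生成序列标签"""
--     jobs = ["frontend", "backend", "api", "worker", "scheduler"]
--     instances = [f"instance-{i:03d}" for i in range(20)]
--     regions = ["us-east-1", "us-west-2", "eu-west-1", "ap-southeast-1"]
--     environments = ["production", "staging", "development"]
--
--     labels = [
--         f'job="{job}", instance="{instance}", region="{region}", environment="{environment}"'
--         for environment in environments
--         for region in regions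
--         for instance in instances
--         for job in jobs
--     ]
--     return labels[series_index % len(labels)]
-- ===== Notes on version B (the rewrite author's own statement) =====
-- stated objective: alternative
-- what changed: Instead of computing job/instance/region/environment with per-component divisor-and-modulo arithmetic, B precomputes the full table of all 1200 label combinations (a nested comprehension over environments, regions, instances, jobs) and returns labels[series_index % 1200]; correctness rests on A's result depending only on series_index mod 1200.
import Mathlib
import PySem

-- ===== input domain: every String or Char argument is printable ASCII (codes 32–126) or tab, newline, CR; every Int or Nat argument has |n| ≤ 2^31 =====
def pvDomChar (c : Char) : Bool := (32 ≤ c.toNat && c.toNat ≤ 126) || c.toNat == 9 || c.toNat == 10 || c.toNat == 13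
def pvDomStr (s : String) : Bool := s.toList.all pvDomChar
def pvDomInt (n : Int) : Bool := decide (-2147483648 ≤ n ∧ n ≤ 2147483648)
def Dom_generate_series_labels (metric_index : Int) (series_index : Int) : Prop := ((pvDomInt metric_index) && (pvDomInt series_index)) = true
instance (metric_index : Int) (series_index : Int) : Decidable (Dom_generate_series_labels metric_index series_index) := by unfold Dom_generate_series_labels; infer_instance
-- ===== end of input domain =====

-- B replaces A's per-component divisor arithmetic by a precomputed table of all
-- 1200 label combinations indexed by series_index % 1200 (objective: alternative).

-- shared literal data (identical lines in both Pythons)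
def pvJobs : List String := ["frontend", "backend", "api", "worker", "scheduler"]

-- f"instance-{i:03d}" for 0 ≤ i < 20 (exact on that range: zero-pad to 3 digits)
def pvInstName (i : Int) : String :=
  "instance-" ++ (if i < 10 then "00" else if i < 100 then "0" else "") ++ PySem.Int.toStr i

def pvInstances : List String := (PySem.List.pyRange 0 20 1).map pvInstName

def pvRegions : List String := ["us-east-1", "us-west-2", "eu-west-1", "ap-southeast-1"]

def pvEnvs : List String := ["production", "staging", "development"]

def pvFmt (job instance_ region environment : String) : String :=
  "job=\"" ++ job ++ "\", instance=\"" ++ instance_ ++ "\", region=\"" ++ region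
    ++ "\", environment=\"" ++ environment ++ "\""

-- ===== PORT A =====
-- indexing cat[k]: k = x % len(cat) is always in range, so pyGet? is always some; .getD "" is never taken
def generate_series_labels (metric_index : Int) (series_index : Int) : String :=
  let jobs := pvJobs
  let instances := pvInstances
  let regions := pvRegions
  let environments := pvEnvs
  let job := (PySem.List.pyGet? jobs (PySem.Int.mod series_index (jobs.length : Int))).getD ""
  let instance_ := (PySem.List.pyGet? instances
    (PySem.Int.mod (PySem.Int.floordiv series_index (jobs.length : Int)) (instances.length : Int))).getD ""
  let region := (PySem.List.pyGet? regions
    (PySem.Int.mod (PySem.Int.floordiv series_index ((jobs.length : Int) * (instances.length : Int))) (regions.length : Int))).getD ""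
  let environment := (PySem.List.pyGet? environments
    (PySem.Int.mod (PySem.Int.floordiv series_index ((jobs.length : Int) * (instances.length : Int) * (regions.length : Int))) (environments.length : Int))).getD ""
  pvFmt job instance_ region environment

-- ===== PORT B =====
-- the comprehension [fmt(...) for environment in envs for region in regions for instance in instances for job in jobs]
def pvTable : List String :=
  pvEnvs.flatMap fun environment =>
    pvRegions.flatMap fun region =>
      pvInstances.flatMap fun instance_ =>
        pvJobs.map fun job => pvFmt job instance_ region environment

-- labels[series_index % len(labels)]
def generate_series_labels_alt (metric_index : Int) (series_index : Int) : String :=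
  let labels := pvTable
  (PySem.List.pyGet? labels (PySem.Int.mod series_index (labels.length : Int))).getD ""

-- ===== PRECONDITION & SPEC =====
def Spec_generate_series_labels (metric_index : Int) (series_index : Int) (out : String) : Prop := out = generate_series_labels_alt metric_index series_index
instance (metric_index : Int) (series_index : Int) (out : String) : Decidable (Spec_generate_series_labels metric_index series_index out) := by unfold Spec_generate_series_labels; infer_instance

-- ===== CLAIM =====
def Claim_equal_generate_series_labels : Prop := ∀ (metric_index : Int) (series_index : Int), Dom_generate_series_labels metric_index series_index → Spec_generate_series_labels metric_index series_index (generate_series_labels metric_index series_index)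

-- ===== LEMMAS AND PROOFS =====
set_option maxRecDepth 10000

-- indexing into a flatMap whose blocks all have length n
theorem pv_flatMap_getElem? {α β : Type} (g : α → List β) (n : Nat)
    (h : ∀ a, (g a).length = n) :
    ∀ (l : List α) (i j : Nat), j < n →
      (l.flatMap g)[i * n + j]? = (l[i]?).bind fun a => (g a)[j]? := by
  intro l
  induction l with
  | nil => intro i j hj; simp
  | cons a t ih =>
    intro i j hj
    cases i with
    | zero =>
      simp only [List.flatMap_cons, Nat.zero_mul, Nat.zero_add]
      rw [List.getElem?_append_left (by rw [h a]; exact hj)]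
      simp
    | succ i =>
      simp only [List.flatMap_cons]
      rw [List.getElem?_append_right (by rw [h a]; nlinarith)]
      have he : (i+1) * n + j - (g a).length = i * n + j := by rw [h a]; ring_nf; omega
      rw [he, ih i j hj]
      simp

theorem pv_len_table : pvTable.length = 1200 := by
  have hI : pvInstances.length = 20 := by decide
  simp [pvTable, List.length_flatMap, pvEnvs, pvRegions, pvJobs, hI]

-- the table entry at index n < 1200 is the mixed-radix pick
theorem pv_table_get (n : Nat) :
    pvTable[n]? = (pvEnvs[n / 400]?).bind fun e =>
      (pvRegions[n / 100 % 4]?).bind fun reg =>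
        (pvInstances[n / 5 % 20]?).bind fun inst =>
          (pvJobs[n % 5]?).map fun j => pvFmt j inst reg e := by
  have hI : pvInstances.length = 20 := by decide
  have h1 : ∀ e : String, (pvRegions.flatMap fun region => pvInstances.flatMap fun instance_ => pvJobs.map fun job => pvFmt job instance_ region e).length = 400 := by
    intro e; simp [pvRegions, List.length_flatMap, pvJobs, hI]
  have h2 : ∀ e reg : String, (pvInstances.flatMap fun instance_ => pvJobs.map fun job => pvFmt job instance_ reg e).length = 100 := by
    intro e reg; simp [List.length_flatMap, pvJobs, hI]
  have h3 : ∀ e reg inst : String, ((pvJobs.map fun job => pvFmt job inst reg e)).length = 5 := by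
    intro e reg inst; simp [pvJobs]
  have k1 := pv_flatMap_getElem? _ 400 h1 pvEnvs (n / 400) (n % 400) (by omega)
  rw [show n / 400 * 400 + n % 400 = n from by omega] at k1
  rw [pvTable] at *
  rw [k1]
  congr 1
  funext e
  have k2 := pv_flatMap_getElem? _ 100 (h2 e) pvRegions (n % 400 / 100) (n % 100) (by omega)
  rw [show n % 400 / 100 * 100 + n % 100 = n % 400 from by omega,
      show n % 400 / 100 = n / 100 % 4 from by omega] at k2
  rw [k2]
  congr 1
  funext reg
  have k3 := pv_flatMap_getElem? _ 5 (h3 e reg) pvInstances (n % 100 / 5) (n % 5) (by omega)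
  rw [show n % 100 / 5 * 5 + n % 5 = n % 100 from by omega,
      show n % 100 / 5 = n / 5 % 20 from by omega] at k3
  rw [k3]
  congr 1
  funext inst
  simp

-- A's result depends only on series_index mod 1200 (5·20·4·3)
theorem pvA_mod_period (m s : Int) :
    generate_series_labels m s = generate_series_labels m (s % 1200) := by
  have hJ : (pvJobs.length : Int) = 5 := by decide
  have hI : (pvInstances.length : Int) = 20 := by decide
  have hR : (pvRegions.length : Int) = 4 := by decide
  have hE : (pvEnvs.length : Int) = 3 := by decide
  simp only [generate_series_labels, hJ, hI, hR, hE,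
    PySem.Int.mod_eq_emod_of_pos (show (0:Int) < 5 by decide),
    PySem.Int.mod_eq_emod_of_pos (show (0:Int) < 20 by decide),
    PySem.Int.mod_eq_emod_of_pos (show (0:Int) < 4 by decide),
    PySem.Int.mod_eq_emod_of_pos (show (0:Int) < 3 by decide),
    PySem.Int.floordiv_eq_ediv_of_pos (show (0:Int) < 5 by decide)]
  norm_num
  rw [show s % 1200 / 5 % 20 = s / 5 % 20 from by omega,
      show s % 1200 / 100 % 4 = s / 100 % 4 from by omega,
      show s % 1200 / 400 % 3 = s / 400 % 3 from by omega]

-- B's result depends only on series_index mod 1200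
theorem pvB_mod_period (m s : Int) :
    generate_series_labels_alt m s = generate_series_labels_alt m (s % 1200) := by
  have hT : (pvTable.length : Int) = 1200 := by rw [pv_len_table]; norm_num
  simp only [generate_series_labels_alt, hT,
    PySem.Int.mod_eq_emod_of_pos (show (0:Int) < 1200 by decide)]
  rw [show s % 1200 % 1200 = s % 1200 from by omega]

-- the two ports agree on every residue 0 ≤ n < 1200 (structural, via pv_table_get)
theorem pv_agree (m : Int) (n : Nat) (hn : n < 1200) :
    generate_series_labels m (n:Int) = generate_series_labels_alt m (n:Int) := by
  have hJ : (pvJobs.length : Int) = 5 := by decide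
  have hI : (pvInstances.length : Int) = 20 := by decide
  have hR : (pvRegions.length : Int) = 4 := by decide
  have hE : (pvEnvs.length : Int) = 3 := by decide
  have hT : (pvTable.length : Int) = 1200 := by rw [pv_len_table]; norm_num
  simp only [generate_series_labels, generate_series_labels_alt, hJ, hI, hR, hE, hT]
  norm_num
  rw [show ((n:Int) % 5) = ((n % 5 : Nat) : Int) from by omega,
      show ((n:Int) / 5 % 20) = ((n / 5 % 20 : Nat) : Int) from by omega,
      show ((n:Int) / 100 % 4) = ((n / 100 % 4 : Nat) : Int) from by omega,
      show ((n:Int) / 400 % 3) = ((n / 400 % 3 : Nat) : Int) from by omega,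
      show ((n:Int) % 1200) = ((n % 1200 : Nat) : Int) from by omega]
  simp only [PySem.List.pyGet?_natCast]
  rw [show n % 1200 = n from by omega, show n / 400 % 3 = n / 400 from by omega,
      pv_table_get n]
  have lJ : pvJobs.length = 5 := by decide
  have lI : pvInstances.length = 20 := by decide
  have lR : pvRegions.length = 4 := by decide
  have lE : pvEnvs.length = 3 := by decide
  rw [List.getElem?_eq_getElem (show n % 5 < pvJobs.length by omega),
      List.getElem?_eq_getElem (show n / 5 % 20 < pvInstances.length by omega),
      List.getElem?_eq_getElem (show n / 100 % 4 < pvRegions.length by omega),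
      List.getElem?_eq_getElem (show n / 400 < pvEnvs.length by omega)]
  simp

-- ===== VERDICT =====
theorem generate_series_labels_spec : Claim_equal_generate_series_labels := by
  intro m s _
  show generate_series_labels m s = generate_series_labels_alt m s
  rw [pvA_mod_period, pvB_mod_period]
  have h0 : 0 ≤ s % 1200 := Int.emod_nonneg s (by decide)
  have h1 : s % 1200 < 1200 := Int.emod_lt_of_pos s (by decide)
  have hc : s % 1200 = (((s % 1200).toNat : Nat) : Int) := by omega
  rw [hc]
  exact pv_agree m (s % 1200).toNat (by omega)
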